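-- pv_equiv track=rewrite | github.com/ashwinchidambaram/dunphy-family-vacation-debate | discussion/orchestrator.py | _sanitize_agent_output
-- ===== SOURCE A (Python) =====
-- def _sanitize_agent_output(agent_name: str, text: str) -> str:
--     """
--     Remove leaked transcript continuation markers from model output.
--     """
--     cleaned = text.strip()
--     if not cleaned:
--         return cleaned
--
--     # Remove self-prefix if model emits "Name: ..." instead of direct speech.
--     self_prefix = f"{agent_name}:"
--     if cleaned.startswith(self_prefix):
--         cleaned = cleaned[len(self_prefix):].strip()
--
--     # Cut off when output starts replaying transcript turns.
--     cutoff_markers = [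
--         "\n[user]",
--         "\n[assistant]",
--         " [user]",
--         " [assistant]",
--         "\nPhil:",
--         "\nClaire:",
--         "\nHaley:",
--         "\nAlex:",
--         "\nLuke:",
--         "\nManny:",
--         "\nSystem:",
--     ]
--     lowest = len(cleaned)
--     for marker in cutoff_markers:
--         idx = cleaned.find(marker)
--         if idx != -1:
--             lowest = min(lowest, idx)
--
--     cleaned = cleaned[:lowest].strip()
--     return cleaned
-- ===== SOURCE B (Python) =====
-- def _sanitize_agent_output(agent_name: str, text: str) -> str:
--     """
--     Remove leaked transcript continuation markers from model output.
--     Single left-to-right scan: truncate at the first position where any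
--     cutoff marker starts, instead of one find() per marker plus a min.
--     """
--     cleaned = text.strip()
--     if not cleaned:
--         return cleaned
--
--     self_prefix = f"{agent_name}:"
--     if cleaned.startswith(self_prefix):
--         cleaned = cleaned[len(self_prefix):].strip()
--
--     cutoff_markers = (
--         "\n[user]",
--         "\n[assistant]",
--         " [user]",
--         " [assistant]",
--         "\nPhil:",
--         "\nClaire:",
--         "\nHaley:",
--         "\nAlex:",
--         "\nLuke:",
--         "\nManny:",
--         "\nSystem:",
--     )
--     cut = next((i for i in range(len(cleaned))
--                 if any(cleaned.startswith(m, i) for m in cutoff_markers)), None)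
--     if cut is not None:
--         cleaned = cleaned[:cut]
--     return cleaned.strip()
-- ===== Notes on version B (the rewrite author's own statement) =====
-- stated objective: alternative
-- what changed: Replaces the per-marker find() calls plus a min-reduction with a single left-to-right scan that truncates at the first position where any cutoff marker starts.
import Mathlib
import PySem

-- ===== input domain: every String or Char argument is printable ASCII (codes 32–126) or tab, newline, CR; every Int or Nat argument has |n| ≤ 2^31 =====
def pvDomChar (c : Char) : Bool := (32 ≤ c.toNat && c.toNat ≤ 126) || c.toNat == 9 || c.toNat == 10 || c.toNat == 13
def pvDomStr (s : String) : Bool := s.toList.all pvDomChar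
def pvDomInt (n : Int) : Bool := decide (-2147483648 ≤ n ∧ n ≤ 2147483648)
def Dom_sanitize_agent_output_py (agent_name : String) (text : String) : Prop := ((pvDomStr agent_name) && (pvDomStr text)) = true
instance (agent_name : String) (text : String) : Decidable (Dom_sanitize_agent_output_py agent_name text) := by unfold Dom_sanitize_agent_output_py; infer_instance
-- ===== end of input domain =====

-- B replaces the per-marker find()+min reduction by one left-to-right scan that
-- truncates at the first position where any marker starts (objective: alternative).

-- the cutoff-marker list shared by both Python versions, verbatim
def pvMarkers : List String :=
  ["\n[user]", "\n[assistant]", " [user]", " [assistant]",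
   "\nPhil:", "\nClaire:", "\nHaley:", "\nAlex:", "\nLuke:", "\nManny:", "\nSystem:"]

-- ===== PORT A =====
def sanitize_agent_output_py (agent_name : String) (text : String) : String :=
  let cleaned := PySem.Str.strip text
  if cleaned = "" then cleaned else
    let self_prefix := agent_name ++ ":"
    let cleaned :=
      if PySem.Str.startswith cleaned self_prefix then
        PySem.Str.strip (PySem.Str.slice cleaned (some (PySem.Str.len self_prefix)) none)
      else cleaned
    let lowest := pvMarkers.foldl (fun lowest marker =>
      let idx := PySem.Str.find cleaned marker
      if idx ≠ -1 then min lowest idx else lowest) (PySem.Str.len cleaned)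
    PySem.Str.strip (PySem.Str.slice cleaned none (some lowest))

-- ===== PORT B =====
def sanitize_agent_output_py_alt (agent_name : String) (text : String) : String :=
  let cleaned := PySem.Str.strip text
  if cleaned = "" then cleaned else
    let self_prefix := agent_name ++ ":"
    let cleaned :=
      if PySem.Str.startswith cleaned self_prefix then
        PySem.Str.strip (PySem.Str.slice cleaned (some (PySem.Str.len self_prefix)) none)
      else cleaned
    -- cleaned.startswith(m, i) with 0 ≤ i < len(cleaned): exact as "m is a prefix of cleaned[i:]"
    let cut := (List.range cleaned.toList.length).find? (fun i =>
      pvMarkers.any (fun m => m.toList.isPrefixOf (cleaned.toList.drop i)))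
    let cleaned := match cut with
      | some i => PySem.Str.slice cleaned none (some (i : Int))
      | none => cleaned
    PySem.Str.strip cleaned

-- ===== PRECONDITION & SPEC =====
def Spec_sanitize_agent_output_py (agent_name : String) (text : String) (out : String) : Prop := out = sanitize_agent_output_py_alt agent_name text
instance (agent_name : String) (text : String) (out : String) : Decidable (Spec_sanitize_agent_output_py agent_name text out) := by unfold Spec_sanitize_agent_output_py; infer_instance

-- ===== CLAIM (what is proved, stated in full; the proofs are below) =====
def Claim_equal_sanitize_agent_output_py : Prop := ∀ (agent_name : String) (text : String), Dom_sanitize_agent_output_py agent_name text → Spec_sanitize_agent_output_py agent_name text (sanitize_agent_output_py agent_name text)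

-- ===== LEMMAS AND PROOFS =====

-- the predicate B scans with, on the character list of `cleaned`
def pvHit (cs : List Char) (i : Nat) : Bool :=
  pvMarkers.any (fun m => m.toList.isPrefixOf (cs.drop i))

-- A's fold step
def pvStep (cs : List Char) (lowest : Int) (marker : String) : Int :=
  let idx := PySem.Chars.find cs marker.toList
  if idx ≠ -1 then min lowest idx else lowest

lemma pvFold_le (cs : List Char) (ms : List String) (low : Int) :
    ms.foldl (pvStep cs) low ≤ low := by
  induction ms generalizing low with
  | nil => simp [List.foldl]
  | cons m ms ih =>
    refine le_trans (ih _) ?_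
    simp only [pvStep]
    split <;> simp

lemma pvFold_cases (cs : List Char) (ms : List String) (low : Int) :
    ms.foldl (pvStep cs) low = low ∨
      ∃ m ∈ ms, ms.foldl (pvStep cs) low = PySem.Chars.find cs m.toList ∧
        PySem.Chars.find cs m.toList ≠ -1 := by
  induction ms generalizing low with
  | nil => simp [List.foldl]
  | cons m ms ih =>
    simp only [List.foldl_cons]
    rcases ih (pvStep cs low m) with h | ⟨m', hm', h, hne⟩
    · rw [h]; simp only [pvStep]
      split
      · rcases min_cases low (PySem.Chars.find cs m.toList) with ⟨h', _⟩ | ⟨h', _⟩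
        · exact Or.inl h'
        · exact Or.inr ⟨m, by simp, h', by assumption⟩
      · exact Or.inl rfl
    · exact Or.inr ⟨m', by simp [hm'], h, hne⟩

lemma pvFold_min (cs : List Char) (ms : List String) (low : Int) :
    ∀ m ∈ ms, PySem.Chars.find cs m.toList ≠ -1 →
      ms.foldl (pvStep cs) low ≤ PySem.Chars.find cs m.toList := by
  induction ms generalizing low with
  | nil => simp
  | cons m ms ih =>
    intro m' hm' hne
    rcases List.mem_cons.mp hm' with rfl | hmem
    · refine le_trans (pvFold_le cs ms _) ?_
      simp only [pvStep, if_pos hne]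
      exact min_le_right _ _
    · exact ih _ m' hmem hne

-- find's minimality at start 0
lemma pvFind_le_of_prefix (cs m : List Char) (i : Nat) (h : m.isPrefixOf (cs.drop i)) :
    PySem.Chars.find cs m ≤ (i : Int) := by
  have hpre : m <+: cs.drop i := List.isPrefixOf_iff_prefix.mp h
  have hne : PySem.Chars.find cs m ≠ -1 := by
    rw [PySem.Chars.find_ne_neg_one_iff]
    exact (PySem.Chars.isIn_iff_infix m cs).mp
      ((PySem.Chars.exists_prefix_drop_iff_isIn m cs).mp ⟨i, hpre⟩)
  have h0 : PySem.Chars.findFrom cs m (((0 : Nat) : Int)) ≠ -1 := by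
    simpa [PySem.Chars.findFrom_zero] using hne
  obtain ⟨-, -, hmin⟩ := PySem.Chars.findFrom_natCast_spec cs m 0 (Nat.zero_le _) h0
  simp only [Nat.cast_zero, PySem.Chars.findFrom_zero] at hmin
  by_contra hlt
  push_neg at hlt
  have h0le : (0:Int) ≤ PySem.Chars.find cs m := by
    have := PySem.Chars.neg_one_le_find cs m; omega
  exact hmin i (Nat.zero_le _) (by omega) hpre

lemma pvFind_prefix (cs m : List Char) (h : PySem.Chars.find cs m ≠ -1) :
    m <+: cs.drop (PySem.Chars.find cs m).toNat := by
  have h0 : PySem.Chars.findFrom cs m (((0 : Nat) : Int)) ≠ -1 := by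
    simpa [PySem.Chars.findFrom_zero] using h
  obtain ⟨-, hp, -⟩ := PySem.Chars.findFrom_natCast_spec cs m 0 (Nat.zero_le _) h0
  simpa [PySem.Chars.findFrom_zero] using hp

-- find? over range n returns the least index satisfying P
lemma pvRangeFind_le {P : Nat → Bool} : ∀ {n i : Nat},
    (List.range n).find? P = some i → ∀ j < n, P j = true → i ≤ j := by
  intro n
  induction n with
  | zero => intro i h; rw [List.range_zero] at h; simp at h
  | succ n ih =>
    intro i h j hj hPj
    rw [List.range_succ, List.find?_append] at h
    cases hfn : (List.range n).find? P with
    | some k =>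
      rw [hfn] at h
      simp only [Option.some_or] at h
      injection h with h; subst h
      rcases Nat.lt_succ_iff_lt_or_eq.mp hj with hj' | rfl
      · exact ih hfn j hj' hPj
      · have := List.mem_range.mp (List.mem_of_find?_eq_some hfn)
        omega
    | none =>
      rw [hfn] at h
      simp only [Option.none_or] at h
      have hi : i = n := by
        simp only [List.find?] at h
        split at h
        · injection h with h; omega
        · exact absurd h (by simp)
      rcases Nat.lt_succ_iff_lt_or_eq.mp hj with hj' | rfl
      · exact absurd hPj (List.find?_eq_none.mp hfn j (List.mem_range.mpr hj'))
      · omega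

-- every marker is a nonempty string
lemma pvMarkers_ne_nil : ∀ m ∈ pvMarkers, m.toList ≠ [] := by decide

-- the core: A's min-of-finds equals B's first-hit scan, on any cleaned string
lemma pvCore (s : String) :
    PySem.Str.strip (PySem.Str.slice s none
        (some (pvMarkers.foldl (pvStep s.toList) (PySem.Str.len s)))) =
      PySem.Str.strip (match (List.range s.toList.length).find? (pvHit s.toList) with
        | some i => PySem.Str.slice s none (some (i : Int))
        | none => s) := by
  set cs := s.toList with hcs
  set n := cs.length with hn
  have hlen : PySem.Str.len s = (n : Int) := by
    simp [PySem.Str.len_eq, hcs, hn]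
  rw [hlen]
  cases hfind : (List.range n).find? (pvHit cs) with
  | none =>
    -- no marker occurs anywhere: every find is -1, so the fold stays at n and the slice is all of s
    have hnohit : ∀ i < n, pvHit cs i = false := by
      intro i hi
      have := List.find?_eq_none.mp hfind i (List.mem_range.mpr hi)
      simpa using this
    have hall : ∀ m ∈ pvMarkers, PySem.Chars.find cs m.toList = -1 := by
      intro m hm
      by_contra hne
      have hinf := (PySem.Chars.find_ne_neg_one_iff cs m.toList).mp hne
      have : ∃ j, m.toList <+: cs.drop j := by
        rw [PySem.Chars.exists_prefix_drop_iff_isIn, PySem.Chars.isIn_iff_infix]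
        exact hinf
      obtain ⟨j, hj⟩ := this
      by_cases hjn : j < n
      · have hT : pvHit cs j = true := by
          simp only [pvHit, List.any_eq_true]
          exact ⟨m, hm, List.isPrefixOf_iff_prefix.mpr hj⟩
        rw [hnohit j hjn] at hT; exact absurd hT (by simp)
      · have hdrop : cs.drop j = [] := List.drop_eq_nil_of_le (by omega)
        rw [hdrop] at hj
        exact pvMarkers_ne_nil m hm (List.prefix_nil.mp hj)
    have hLn : pvMarkers.foldl (pvStep cs) ((n : Int)) = (n : Int) := by
      rcases pvFold_cases cs pvMarkers ((n : Int)) with h | ⟨m, hm, _, hne⟩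
      · exact h
      · exact absurd (hall m hm) hne
    rw [hLn]
    show PySem.Str.strip (PySem.Str.slice s none (some (n : Int))) = PySem.Str.strip s
    congr 1
    apply String.toList_inj.mp
    rw [PySem.Str.toList_slice]
    rw [PySem.Chars.slice_eq_listSlice, PySem.List.slice_to s.toList (Int.natCast_nonneg n)]
    simp [← hcs, hn]
  | some i =>
    -- first hit at i: the fold result equals i
    set L := pvMarkers.foldl (pvStep cs) ((n : Int)) with hL
    have hPi : pvHit cs i = true := List.find?_some hfind
    have hin : i < n := List.mem_range.mp (List.mem_of_find?_eq_some hfind)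
    have hmin : ∀ j < i, pvHit cs j = false := by
      intro j hj
      cases h : pvHit cs j with
      | false => rfl
      | true =>
        have hjn : j < n := by omega
        have := pvRangeFind_le hfind j hjn h
        omega
    have hLle : L ≤ (i : Int) := by
      simp only [pvHit, List.any_eq_true] at hPi
      obtain ⟨m, hm, hp⟩ := hPi
      have hpre : m.toList <+: cs.drop i := List.isPrefixOf_iff_prefix.mp hp
      have hne : PySem.Chars.find cs m.toList ≠ -1 := by
        rw [PySem.Chars.find_ne_neg_one_iff]
        exact (PySem.Chars.isIn_iff_infix _ _).mp
          ((PySem.Chars.exists_prefix_drop_iff_isIn _ _).mp ⟨i, hpre⟩)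
      exact le_trans (pvFold_min cs pvMarkers _ m hm hne) (pvFind_le_of_prefix cs m.toList i hp)
    have hiL : (i : Int) ≤ L := by
      by_contra hlt
      push_neg at hlt
      rcases pvFold_cases cs pvMarkers ((n : Int)) with h | ⟨m, hm, h, hne⟩
      · rw [← hL] at h; omega
      · rw [← hL] at h
        have h0L : (0 : Int) ≤ L := by
          rw [h]; have := PySem.Chars.neg_one_le_find cs m.toList; omega
        have hp := pvFind_prefix cs m.toList hne
        rw [← h] at hp
        have hhit : pvHit cs L.toNat = true := by
          simp only [pvHit, List.any_eq_true]
          exact ⟨m, hm, List.isPrefixOf_iff_prefix.mpr hp⟩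
        have hLi : L.toNat < i := by omega
        rw [hmin L.toNat hLi] at hhit
        exact absurd hhit (by simp)
    have hLi : L = (i : Int) := le_antisymm hLle hiL
    rw [hLi]

-- ===== VERDICT (by name: the statement is the Claim_ definition above) =====
theorem sanitize_agent_output_py_spec : Claim_equal_sanitize_agent_output_py := by
  intro agent_name text _
  unfold Spec_sanitize_agent_output_py sanitize_agent_output_py sanitize_agent_output_py_alt
  simp only []
  split
  · rfl
  · exact pvCore _
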